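-- pv_equiv track=rewrite | github.com/LenoreWoW/Final_DT | dt_project/config/config_manager.py | _env_to_config_path
-- ===== SOURCE A (Python) =====
-- from typing import Dict, Any, Optional
--
-- def _env_to_config_path(env_name: str) -> Optional[list]:
--     """Convert environment variable name to config path."""
--     # Example: WEATHER_API_KEY -> ['api', 'weather', 'api_key']
--     if env_name.startswith('DT_'):
--         # Remove DT_ prefix
--         name = env_name[3:]
--     else:
--         # Handle special prefixes
--         prefixes = {
--             'WEATHER_': ['api', 'weather'],
--             'GEOCODING_': ['api', 'geocoding'],
--             'QUANTUM_': ['quantum'],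
--             'UI_': ['ui']
--         }
--
--         for prefix, path_prefix in prefixes.items():
--             if env_name.startswith(prefix):
--                 parts = env_name[len(prefix):].lower().split('_')
--                 return path_prefix + parts
--
--         # Not a recognized prefix
--         return None
--
--     # Convert snake_case to config path
--     return name.lower().split('_')
-- ===== SOURCE B (Python) =====
-- _TABLE = {
--     'DT': [],
--     'WEATHER': ['api', 'weather'],
--     'GEOCODING': ['api', 'geocoding'],
--     'QUANTUM': ['quantum'],
--     'UI': ['ui'],
-- }
--
--
-- def _env_to_config_path(env_name):
--     """Convert environment variable name to config path."""
--     # Split off the first '_'-delimited token and dispatch on it by dict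
--     # lookup instead of scanning candidate prefixes with startswith.
--     head, sep, rest = env_name.partition('_')
--     if not sep:
--         return None
--     path_prefix = _TABLE.get(head)
--     if path_prefix is None:
--         return None
--     return path_prefix + rest.lower().split('_')
-- ===== Notes on version B (the rewrite author's own statement) =====
-- stated objective: simpler
-- what changed: Instead of A's special-cased DT_ branch plus an ordered startswith scan over four prefixes, B partitions the name at its first '_' once and dispatches on the head token with a single dict lookup.
import Mathlib
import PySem

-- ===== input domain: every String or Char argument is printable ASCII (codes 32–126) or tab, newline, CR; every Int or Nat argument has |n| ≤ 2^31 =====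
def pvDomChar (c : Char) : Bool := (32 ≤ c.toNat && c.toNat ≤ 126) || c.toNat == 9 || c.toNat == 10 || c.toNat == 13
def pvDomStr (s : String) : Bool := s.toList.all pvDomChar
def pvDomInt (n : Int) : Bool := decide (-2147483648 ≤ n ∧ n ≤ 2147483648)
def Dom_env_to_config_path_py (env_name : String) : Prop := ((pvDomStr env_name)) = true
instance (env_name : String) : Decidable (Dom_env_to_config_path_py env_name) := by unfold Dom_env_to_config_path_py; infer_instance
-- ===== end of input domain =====

-- B replaces A's DT_ branch plus startswith prefix scan by partitioning the name at its
-- first '_' and dispatching on the head token with one dict lookup (objective: simpler).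

-- ===== PORT A =====
-- the 'prefixes' dict of A, in insertion order
def pvAPrefixes : List (String × List String) :=
  [("WEATHER_", ["api", "weather"]),
   ("GEOCODING_", ["api", "geocoding"]),
   ("QUANTUM_", ["quantum"]),
   ("UI_", ["ui"])]

-- A's 'for prefix, path_prefix in prefixes.items(): ...' with early return
def pvALoop (env_name : String) : List (String × List String) → Option (List String)
  | [] => none
  | (pfx, path_prefix) :: rest =>
    if PySem.Str.startswith env_name pfx then
      some (path_prefix ++ (PySem.Str.split? (PySem.Str.lower (PySem.Str.slice env_name (some (PySem.Str.len pfx)) none)) "_").getD [])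
    else pvALoop env_name rest

def env_to_config_path_py (env_name : String) : Option (List String) :=
  if PySem.Str.startswith env_name "DT_" then
    let name := PySem.Str.slice env_name (some 3) none
    some ((PySem.Str.split? (PySem.Str.lower name) "_").getD [])
  else
    pvALoop env_name pvAPrefixes

-- ===== PORT B =====
-- Source B's _TABLE dict
def pvBTable : PySem.Dict String (List String) :=
  PySem.Dict.ofList
    [("DT", []),
     ("WEATHER", ["api", "weather"]),
     ("GEOCODING", ["api", "geocoding"]),
     ("QUANTUM", ["quantum"]),
     ("UI", ["ui"])]

-- hand port of env_name.partition('_') (PySem has no partition): scan for the FIRST '_',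
-- returning (text before it, found-flag standing for the separator text, text after it);
-- exact: Python's partition splits at the first occurrence and ('' falsy) iff no '_' occurs.
def pvPartitionU : List Char → List Char × Bool × List Char
  | [] => ([], false, [])
  | c :: cs =>
    if c = '_' then ([], true, cs)
    else
      let (h, f, r) := pvPartitionU cs
      (c :: h, f, r)

def env_to_config_path_py_alt (env_name : String) : Option (List String) :=
  let (head, sep, rest) := pvPartitionU env_name.toList
  if sep = false then none
  else
    match PySem.Dict.get? pvBTable (String.ofList head) with
    | none => none
    | some path_prefix =>
        some (path_prefix ++ (PySem.Str.split? (PySem.Str.lower (String.ofList rest)) "_").getD [])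


-- ===== PRECONDITION & SPEC =====
def Spec_env_to_config_path_py (env_name : String) (out : Option (List String)) : Prop := out = env_to_config_path_py_alt env_name
instance (env_name : String) (out : Option (List String)) : Decidable (Spec_env_to_config_path_py env_name out) := by unfold Spec_env_to_config_path_py; infer_instance

-- ===== CLAIM (what is proved, stated in full; the proofs are below) =====
def Claim_equal_env_to_config_path_py : Prop := ∀ (env_name : String), Dom_env_to_config_path_py env_name → Spec_env_to_config_path_py env_name (env_to_config_path_py env_name)

-- ===== LEMMAS AND PROOFS =====
-- a false flag means no '_' occurred in the scanned string
theorem pvPartitionU_flag (s : List Char) (hf : (pvPartitionU s).2.1 = false) : '_' ∉ s := by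
  induction s with
  | nil => simp
  | cons c cs ih =>
    by_cases hc : c = '_'
    · simp [pvPartitionU, hc] at hf
    · rcases hcs : pvPartitionU cs with ⟨h, f, r⟩
      simp only [pvPartitionU, if_neg hc, hcs] at hf
      simp only [List.mem_cons, not_or]
      exact ⟨fun e => hc e.symm, ih (by simp [hcs]; exact hf)⟩

-- a true flag decomposes the string at its FIRST '_'
theorem pvPartitionU_true (s : List Char) : ∀ h r, pvPartitionU s = (h, true, r) →
    s = h ++ '_' :: r ∧ '_' ∉ h := by
  induction s with
  | nil => intro h r he; simp [pvPartitionU] at he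
  | cons c cs ih =>
    intro h r he
    by_cases hc : c = '_'
    · subst hc
      simp only [pvPartitionU, if_pos] at he
      cases he
      simp
    · rcases hcs : pvPartitionU cs with ⟨h', f, r'⟩
      simp only [pvPartitionU, if_neg hc, hcs] at he
      cases he
      obtain ⟨hs, hm⟩ := ih h' r (by rw [hcs])
      constructor
      · simp [hs]
      · simp only [List.mem_cons, not_or]
        exact ⟨fun e => hc e.symm, hm⟩

-- a prefix key++'_' matches h ++ '_' :: r (first '_' right after h) iff key = h
theorem pvPrefix_iff (key : List Char) : ∀ h r, '_' ∉ key → '_' ∉ h →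
    ((key ++ ['_'] <+: h ++ '_' :: r) ↔ key = h) := by
  induction key with
  | nil =>
    intro h r _ hh
    cases h with
    | nil => simp
    | cons d h' =>
      simp only [List.mem_cons, not_or] at hh
      simp only [List.nil_append, List.cons_append, List.cons_prefix_cons]
      constructor
      · rintro ⟨hd, -⟩; exact absurd hd hh.1
      · intro e; simp at e
  | cons c key' ih =>
    intro h r hk hh
    simp only [List.mem_cons, not_or] at hk
    cases h with
    | nil =>
      simp only [List.cons_append, List.nil_append, List.cons_prefix_cons]
      constructor
      · rintro ⟨hd, -⟩; exact absurd hd (fun e => hk.1 e.symm)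
      · intro e; simp at e
    | cons d h' =>
      simp only [List.mem_cons, not_or] at hh
      simp only [List.cons_append, List.cons_prefix_cons]
      rw [ih h' r hk.2 (by simpa using hh.2)]
      simp

-- A's suffix slice env_name[len(prefix):] equals B's partition remainder r
theorem pvSlice_helper (env_name : String) (key r : List Char) (n : Int)
    (hs : env_name.toList = key ++ '_' :: r) (hn : n = (key.length : Int) + 1) :
    PySem.Str.slice env_name (some n) none = String.ofList r := by
  rw [← String.toList_inj, PySem.Str.toList_slice, PySem.Chars.slice_eq_listSlice,
    String.toList_ofList, hs, hn]
  rw [PySem.List.slice_from _ (show (0:Int) ≤ (key.length:Int)+1 by omega)]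
  have h1 : ((key.length : Int) + 1).toNat = (key ++ ['_']).length := by simp
  rw [h1, show key ++ '_' :: r = (key ++ ['_']) ++ r by simp]
  exact List.drop_left

-- key mismatch as a Bool equality on Strings, for the dict-lookup miss case
theorem pvOfList_ne (h : List Char) (p : String) (hne : ¬ h = p.toList) :
    (p == String.ofList h) = false := by
  rw [beq_eq_false_iff_ne]
  intro e
  exact hne (by rw [← String.toList_ofList (l := h), ← e])

-- the two ports agree on every input
theorem pvPorts_agree : ∀ (env_name : String), env_to_config_path_py env_name = env_to_config_path_py_alt env_name := by
  intro env_name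
  unfold env_to_config_path_py env_to_config_path_py_alt
  rcases hp : pvPartitionU env_name.toList with ⟨h, f, r⟩
  cases f with
  | false =>
    have hm : '_' ∉ env_name.toList := pvPartitionU_flag _ (by rw [hp])
    have nosw : ∀ pl : List Char, '_' ∈ pl → PySem.Chars.startswith env_name.toList pl = false := by
      intro pl hmem
      rw [Bool.eq_false_iff]
      intro hsw
      exact hm (((PySem.Chars.startswith_iff _ _).mp hsw).subset hmem)
    simp [pvALoop, pvAPrefixes, nosw ['D','T','_'] (by decide), nosw ['W','E','A','T','H','E','R','_'] (by decide),
      nosw ['G','E','O','C','O','D','I','N','G','_'] (by decide), nosw ['Q','U','A','N','T','U','M','_'] (by decide),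
      nosw ['U','I','_'] (by decide)]
  | true =>
    obtain ⟨hs, hh⟩ := pvPartitionU_true _ h r hp
    have sw : ∀ (key pl : List Char), pl = key ++ ['_'] → '_' ∉ key →
        (PySem.Chars.startswith env_name.toList pl = true ↔ key = h) := by
      intro key pl hpl hkm
      rw [PySem.Chars.startswith_iff, hpl, hs]
      exact pvPrefix_iff key h r hkm hh
    have swf : ∀ (key pl : List Char), pl = key ++ ['_'] → '_' ∉ key →
        ¬ h = key → PySem.Chars.startswith env_name.toList pl = false := by
      intro key pl hpl hkm hne
      rw [Bool.eq_false_iff]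
      intro t
      exact hne ((sw key pl hpl hkm).mp t).symm
    by_cases h1 : h = "DT".toList
    · have t1 : PySem.Chars.startswith env_name.toList ['D','T','_'] = true :=
        (sw "DT".toList ['D','T','_'] (by decide) (by decide)).mpr h1.symm
      rw [if_pos (show PySem.Str.startswith env_name "DT_" = true by simp [t1])]
      rw [pvSlice_helper env_name "DT".toList r 3 (by rw [hs, h1]) (by decide)]
      subst h1
      rfl
    · rw [if_neg (show ¬ PySem.Str.startswith env_name "DT_" = true by
        simp [swf "DT".toList ['D','T','_'] (by decide) (by decide) h1])]
      simp only [pvALoop, pvAPrefixes]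
      by_cases h2 : h = "WEATHER".toList
      · have t2 : PySem.Chars.startswith env_name.toList ['W','E','A','T','H','E','R','_'] = true :=
          (sw "WEATHER".toList ['W','E','A','T','H','E','R','_'] (by decide) (by decide)).mpr h2.symm
        rw [if_pos (show PySem.Str.startswith env_name "WEATHER_" = true by simp [t2])]
        rw [pvSlice_helper env_name "WEATHER".toList r _ (by rw [hs, h2]) (by decide)]
        subst h2
        rfl
      · rw [if_neg (show ¬ PySem.Str.startswith env_name "WEATHER_" = true by
          simp [swf "WEATHER".toList ['W','E','A','T','H','E','R','_'] (by decide) (by decide) h2])]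
        by_cases h3 : h = "GEOCODING".toList
        · have t3 : PySem.Chars.startswith env_name.toList ['G','E','O','C','O','D','I','N','G','_'] = true :=
            (sw "GEOCODING".toList ['G','E','O','C','O','D','I','N','G','_'] (by decide) (by decide)).mpr h3.symm
          rw [if_pos (show PySem.Str.startswith env_name "GEOCODING_" = true by simp [t3])]
          rw [pvSlice_helper env_name "GEOCODING".toList r _ (by rw [hs, h3]) (by decide)]
          subst h3
          rfl
        · rw [if_neg (show ¬ PySem.Str.startswith env_name "GEOCODING_" = true by
            simp [swf "GEOCODING".toList ['G','E','O','C','O','D','I','N','G','_'] (by decide) (by decide) h3])]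
          by_cases h4 : h = "QUANTUM".toList
          · have t4 : PySem.Chars.startswith env_name.toList ['Q','U','A','N','T','U','M','_'] = true :=
              (sw "QUANTUM".toList ['Q','U','A','N','T','U','M','_'] (by decide) (by decide)).mpr h4.symm
            rw [if_pos (show PySem.Str.startswith env_name "QUANTUM_" = true by simp [t4])]
            rw [pvSlice_helper env_name "QUANTUM".toList r _ (by rw [hs, h4]) (by decide)]
            subst h4
            rfl
          · rw [if_neg (show ¬ PySem.Str.startswith env_name "QUANTUM_" = true by
              simp [swf "QUANTUM".toList ['Q','U','A','N','T','U','M','_'] (by decide) (by decide) h4])]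
            by_cases h5 : h = "UI".toList
            · have t5 : PySem.Chars.startswith env_name.toList ['U','I','_'] = true :=
                (sw "UI".toList ['U','I','_'] (by decide) (by decide)).mpr h5.symm
              rw [if_pos (show PySem.Str.startswith env_name "UI_" = true by simp [t5])]
              rw [pvSlice_helper env_name "UI".toList r _ (by rw [hs, h5]) (by decide)]
              subst h5
              rfl
            · rw [if_neg (show ¬ PySem.Str.startswith env_name "UI_" = true by
                simp [swf "UI".toList ['U','I','_'] (by decide) (by decide) h5])]
              have hT : pvBTable = (⟨[("DT", []), ("WEATHER", ["api", "weather"]),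
                  ("GEOCODING", ["api", "geocoding"]), ("QUANTUM", ["quantum"]),
                  ("UI", ["ui"])]⟩ : PySem.Dict String (List String)) := rfl
              simp [hT, PySem.Dict.get?,
                pvOfList_ne h "DT" h1, pvOfList_ne h "WEATHER" h2, pvOfList_ne h "GEOCODING" h3,
                pvOfList_ne h "QUANTUM" h4, pvOfList_ne h "UI" h5]

-- ===== VERDICT (by name: the statement is the Claim_ definition above) =====
theorem env_to_config_path_py_spec : Claim_equal_env_to_config_path_py := by
  intro env_name _
  unfold Spec_env_to_config_path_py
  exact pvPorts_agree env_name
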